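-- pv_equiv track=rewrite | github.com/cetrusa/adminbi-secure | tools/deploy_all_sp.py | parse_sp_statements
-- ===== SOURCE A (Python) =====
-- def parse_sp_statements(raw_sql: str):
--     """Extrae las sentencias DROP y CREATE de un archivo SP.
--
--     Retorna (drop_sql, create_sql).
--     """
--     # Limpiar directivas DELIMITER y marcas $$
--     sql = raw_sql.replace("DELIMITER $$", "")
--     sql = sql.replace("DELIMITER ;", "")
--     sql = sql.replace("$$", "")
--
--     lines = sql.splitlines()
--
--     # Extraer DROP PROCEDURE IF EXISTS
--     drop_sql = None
--     create_lines = []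
--     in_create = False
--
--     for line in lines:
--         stripped = line.strip()
--         upper = stripped.upper()
--
--         # Omitir USE (la conexion ya apunta al schema correcto)
--         if upper.startswith("USE "):
--             continue
--
--         if upper.startswith("DROP PROCEDURE IF EXISTS"):
--             # Asegurar que termina con ;
--             drop_sql = stripped if stripped.endswith(";") else stripped + ";"
--             continue
--
--         if upper.startswith("CREATE PROCEDURE") or upper.startswith("CREATE DEFINER"):
--             in_create = True
--
--         if in_create:
--             create_lines.append(line)
--
--     create_sql = "\n".join(create_lines).strip()
--
--     if not create_sql:
--         raise ValueError("No se encontro sentencia CREATE PROCEDURE en el archivo")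
--
--     return drop_sql, create_sql
-- ===== SOURCE B (Python) =====
-- def parse_sp_statements(raw_sql: str):
--     """Extrae las sentencias DROP y CREATE de un archivo SP.
--
--     Retorna (drop_sql, create_sql).
--     """
--     sql = raw_sql.replace("DELIMITER $$", "").replace("DELIMITER ;", "").replace("$$", "")
--     lines = sql.splitlines()
--
--     # Last DROP PROCEDURE IF EXISTS line anywhere, normalized to end with ';'
--     drop_sql = None
--     for line in lines:
--         s = line.strip()
--         if s.upper().startswith("DROP PROCEDURE IF EXISTS"):
--             drop_sql = s if s.endswith(";") else s + ";"
--
--     # First CREATE PROCEDURE / CREATE DEFINER line; keep everything from there on,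
--     # minus USE and DROP lines.
--     start = next((i for i, line in enumerate(lines)
--                   if line.strip().upper().startswith(("CREATE PROCEDURE", "CREATE DEFINER"))),
--                  None)
--     if start is None:
--         create_lines = []
--     else:
--         create_lines = [line for line in lines[start:]
--                         if not line.strip().upper().startswith(("USE ", "DROP PROCEDURE IF EXISTS"))]
--
--     create_sql = "\n".join(create_lines).strip()
--     if not create_sql:
--         raise ValueError("No se encontro sentencia CREATE PROCEDURE en el archivo")
--     return drop_sql, create_sql
-- ===== Notes on version B (the rewrite author's own statement) =====
-- stated objective: alternative
-- what changed: Replaces A's single stateful line-by-line state machine (drop/in_create/accumulator updated together) with two independent passes: a last-match scan for the DROP statement, and find-first-CREATE-index then slice-and-filter for the CREATE body.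
import Mathlib
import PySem

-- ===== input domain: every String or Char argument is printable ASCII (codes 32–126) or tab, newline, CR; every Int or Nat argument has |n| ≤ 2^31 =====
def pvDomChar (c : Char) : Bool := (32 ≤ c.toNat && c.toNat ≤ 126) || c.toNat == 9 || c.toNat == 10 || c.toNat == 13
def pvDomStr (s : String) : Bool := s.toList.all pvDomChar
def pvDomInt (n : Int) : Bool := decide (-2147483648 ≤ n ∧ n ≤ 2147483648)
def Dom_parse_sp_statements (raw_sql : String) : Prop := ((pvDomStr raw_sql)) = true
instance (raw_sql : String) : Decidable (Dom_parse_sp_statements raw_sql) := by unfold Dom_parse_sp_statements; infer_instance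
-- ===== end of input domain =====

-- B parses by two independent passes (last DROP scan; first-CREATE index + slice-and-filter)
-- instead of A's single fold over a (drop, create_lines, in_create) state machine.

-- ===== PORT A =====
-- cleaning of DELIMITER directives and $$ marks, shared verbatim by both programs
def pvClean (raw : String) : String :=
  PySem.Str.replace (PySem.Str.replace (PySem.Str.replace raw "DELIMITER $$" "") "DELIMITER ;" "") "$$" ""

-- one iteration of A's for-loop over (drop_sql, create_lines, in_create)
def pvStepA (st : Option String × List String × Bool) (line : String) :
    Option String × List String × Bool :=
  let stripped := PySem.Str.strip line
  let upper := PySem.Str.upper stripped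
  if PySem.Str.startswith upper "USE " then st
  else if PySem.Str.startswith upper "DROP PROCEDURE IF EXISTS" then
    (some (if PySem.Str.endswith stripped ";" then stripped else stripped ++ ";"), st.2.1, st.2.2)
  else
    let in_create := PySem.Str.startswith upper "CREATE PROCEDURE"
      || PySem.Str.startswith upper "CREATE DEFINER" || st.2.2
    (st.1, if in_create then st.2.1 ++ [line] else st.2.1, in_create)

def parse_sp_statements (raw_sql : String) : Option String × String :=
  let sql := pvClean raw_sql
  let lines := PySem.Str.splitlines sql
  let st := lines.foldl pvStepA (none, [], false)
  (st.1, PySem.Str.strip (PySem.Str.join "\n" st.2.1))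

-- ===== PORT B =====
def pvUp (l : String) : String := PySem.Str.upper (PySem.Str.strip l)
def pvIsUse (l : String) : Bool := PySem.Str.startswith (pvUp l) "USE "
def pvIsDrop (l : String) : Bool := PySem.Str.startswith (pvUp l) "DROP PROCEDURE IF EXISTS"
def pvIsCreate (l : String) : Bool :=
  PySem.Str.startswith (pvUp l) "CREATE PROCEDURE" || PySem.Str.startswith (pvUp l) "CREATE DEFINER"

-- pass 1: last DROP PROCEDURE IF EXISTS line, normalized to end with ';'
def pvDropStep (acc : Option String) (l : String) : Option String :=
  let s := PySem.Str.strip l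
  if PySem.Str.startswith (PySem.Str.upper s) "DROP PROCEDURE IF EXISTS" then
    some (if PySem.Str.endswith s ";" then s else s ++ ";")
  else acc

def pvKeep (l : String) : Bool := !(pvIsUse l || pvIsDrop l)

-- pass 2: from the first CREATE line onward, minus USE and DROP lines
def pvCreateLines (lines : List String) : List String :=
  match lines.findIdx? pvIsCreate with
  | none => []
  | some i => (lines.drop i).filter pvKeep

def parse_sp_statements_alt (raw_sql : String) : Option String × String :=
  let lines := PySem.Str.splitlines (pvClean raw_sql)
  (lines.foldl pvDropStep none, PySem.Str.strip (PySem.Str.join "\n" (pvCreateLines lines)))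

-- ===== PRECONDITION & SPEC =====
-- Pre_ excludes exactly the inputs with no CREATE PROCEDURE / CREATE DEFINER line after
-- cleaning, on which A raises ValueError (B raises there too).
def Pre_parse_sp_statements (raw_sql : String) : Prop :=
  (PySem.Str.splitlines (pvClean raw_sql)).any pvIsCreate = true
instance (raw_sql : String) : Decidable (Pre_parse_sp_statements raw_sql) := by
  unfold Pre_parse_sp_statements; infer_instance

def pvWitness_parse_sp_statements : String :=
  "DROP PROCEDURE IF EXISTS p\nCREATE PROCEDURE p()\nBEGIN\nEND;"

def Spec_parse_sp_statements (raw_sql : String) (out : Option String × String) : Prop :=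
  out = parse_sp_statements_alt raw_sql
instance (raw_sql : String) (out : Option String × String) :
    Decidable (Spec_parse_sp_statements raw_sql out) := by
  unfold Spec_parse_sp_statements; infer_instance

-- ===== CLAIM (what is proved, stated in full; the proofs are below) =====
def Claim_equal_parse_sp_statements : Prop := ∀ (raw_sql : String),
  Dom_parse_sp_statements raw_sql → Pre_parse_sp_statements raw_sql →
  Spec_parse_sp_statements raw_sql (parse_sp_statements raw_sql)

-- ===== LEMMAS AND PROOFS =====

-- two incomparable string literals cannot both be prefixes of the same string
lemma pv_sw_clash (u p q : String) (hpq : ¬ (p.toList <+: q.toList))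
    (hqp : ¬ (q.toList <+: p.toList))
    (h : PySem.Str.startswith u p = true) : PySem.Str.startswith u q = false := by
  rw [Bool.eq_false_iff]
  intro hq
  rw [PySem.Str.startswith_eq, PySem.Chars.startswith_iff] at h hq
  rcases List.prefix_or_prefix_of_prefix h hq with h' | h'
  · exact hpq h'
  · exact hqp h'

lemma pv_use_not_drop {l : String} (h : pvIsUse l = true) : pvIsDrop l = false :=
  pv_sw_clash _ _ _ (by decide) (by decide) h

lemma pv_create_not_use {l : String} (h : pvIsCreate l = true) : pvIsUse l = false := by
  rcases Bool.or_eq_true_iff.mp h with h' | h'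
  · exact pv_sw_clash _ _ _ (by decide) (by decide) h'
  · exact pv_sw_clash _ _ _ (by decide) (by decide) h'

lemma pv_create_not_drop {l : String} (h : pvIsCreate l = true) : pvIsDrop l = false := by
  rcases Bool.or_eq_true_iff.mp h with h' | h'
  · exact pv_sw_clash _ _ _ (by decide) (by decide) h'
  · exact pv_sw_clash _ _ _ (by decide) (by decide) h'

lemma pv_create_keep {l : String} (h : pvIsCreate l = true) : pvKeep l = true := by
  simp [pvKeep, pv_create_not_use h, pv_create_not_drop h]

-- once in_create is true, A appends every non-USE/DROP line and tracks drop as pvDropStep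
lemma pv_foldA_true (lines : List String) : ∀ (d : Option String) (cs : List String),
    List.foldl pvStepA (d, cs, true) lines
      = (List.foldl pvDropStep d lines, cs ++ lines.filter pvKeep, true) := by
  induction lines with
  | nil => intro d cs; simp
  | cons l ls ih =>
    intro d cs
    by_cases hu : pvIsUse l = true
    · have hd := pv_use_not_drop hu
      have hk : pvKeep l = false := by simp [pvKeep, hu]
      simp [pvIsUse, pvIsDrop, pvUp] at hu hd
      simp [pvStepA, pvDropStep, hu, hd, hk, ih]
    · have hu' : pvIsUse l = false := by simpa using hu
      by_cases hd : pvIsDrop l = true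
      · have hk : pvKeep l = false := by simp [pvKeep, hd]
        simp [pvIsUse, pvIsDrop, pvUp] at hu' hd
        simp [pvStepA, pvDropStep, hu', hd, hk, ih]
      · have hd' : pvIsDrop l = false := by simpa using hd
        have hk : pvKeep l = true := by simp [pvKeep, hu', hd']
        simp [pvIsUse, pvIsDrop, pvUp] at hu' hd'
        simp [pvStepA, pvDropStep, hu', hd', hk, ih]

-- while in_create is false, A skips lines up to the first CREATE line; afterwards see pv_foldA_true
lemma pv_foldA_false (lines : List String) : ∀ (d : Option String) (cs : List String),
    (List.foldl pvStepA (d, cs, false) lines).1 = List.foldl pvDropStep d lines ∧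
    (List.foldl pvStepA (d, cs, false) lines).2.1 = cs ++ pvCreateLines lines := by
  induction lines with
  | nil => intro d cs; simp [pvCreateLines]
  | cons l ls ih =>
    intro d cs
    by_cases hc : pvIsCreate l = true
    · have hu := pv_create_not_use hc
      have hd := pv_create_not_drop hc
      have hk := pv_create_keep hc
      have hcl : pvCreateLines (l :: ls) = l :: ls.filter pvKeep := by
        simp [pvCreateLines, List.findIdx?_cons, hc, hk]
      simp [pvIsUse, pvIsDrop, pvIsCreate, pvUp] at hu hd hc
      rcases hc with h' | h' <;>
        simp [pvStepA, pvDropStep, hu, hd, h', pv_foldA_true, hcl]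
    · have hc' : pvIsCreate l = false := by simpa using hc
      have hcl : pvCreateLines (l :: ls) = pvCreateLines ls := by
        cases h : List.findIdx? pvIsCreate ls with
        | none => simp [pvCreateLines, List.findIdx?_cons, hc', h]
        | some i => simp [pvCreateLines, List.findIdx?_cons, hc', h]
      by_cases hu : pvIsUse l = true
      · have hd := pv_use_not_drop hu
        simp [pvIsUse, pvIsDrop, pvUp] at hu hd
        simp [pvStepA, pvDropStep, hu, hd, ih, hcl]
      · have hu' : pvIsUse l = false := by simpa using hu
        by_cases hd : pvIsDrop l = true
        · simp [pvIsUse, pvIsDrop, pvUp] at hu' hd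
          simp [pvStepA, pvDropStep, hu', hd, ih, hcl]
        · have hd' : pvIsDrop l = false := by simpa using hd
          simp [pvIsUse, pvIsDrop, pvIsCreate, pvUp] at hu' hd' hc'
          simp [pvStepA, pvDropStep, hu', hd', hc'.1, hc'.2, ih, hcl]

-- ===== VERDICT (by name: the statement is the Claim_ definition above) =====
theorem parse_sp_statements_spec : Claim_equal_parse_sp_statements := by
  intro raw_sql _ _
  unfold Spec_parse_sp_statements parse_sp_statements parse_sp_statements_alt
  obtain ⟨h1, h2⟩ := pv_foldA_false (PySem.Str.splitlines (pvClean raw_sql)) none []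
  simp only at h1 h2 ⊢
  rw [h1, h2]
  simp
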